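-- pv_equiv track=rewrite | github.com/treygoff24/rlcoach | src/rlcoach/utils/identity.py | _select_preferred_identifier
-- ===== SOURCE A (Python) =====
-- _PLATFORM_PRIORITY = (
--     "steam",
--     "epic",
--     "psn",
--     "ps4",
--     "ps5",
--     "xbox",
--     "xboxone",
--     "xboxseries",
--     "switch",
--     "nintendo",
-- )
--
-- def _select_preferred_identifier(platform_ids: dict[str, str], slug: str) -> str:
--     for platform in _PLATFORM_PRIORITY:
--         value = platform_ids.get(platform)
--         if value:
--             return f"{platform}:{value}"
--
--     if platform_ids:
--         platform, value = next(iter(sorted(platform_ids.items())))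
--         return f"{platform}:{value}"
--
--     return f"slug:{slug}"
-- ===== SOURCE B (Python) =====
-- _RANK = {
--     "steam": 0,
--     "epic": 1,
--     "psn": 2,
--     "ps4": 3,
--     "ps5": 4,
--     "xbox": 5,
--     "xboxone": 6,
--     "xboxseries": 7,
--     "switch": 8,
--     "nintendo": 9,
-- }
--
--
-- def _select_preferred_identifier(platform_ids: dict[str, str], slug: str) -> str:
--     best = None  # (rank, platform, value); smallest rank wins, first occurrence kept
--     for platform, value in platform_ids.items():
--         if value:
--             r = _RANK.get(platform)
--             if r is not None and (best is None or r < best[0]):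
--                 best = (r, platform, value)
--     if best is not None:
--         return f"{best[1]}:{best[2]}"
--     if platform_ids:
--         platform, value = min(platform_ids.items())
--         return f"{platform}:{value}"
--     return f"slug:{slug}"
-- ===== Notes on version B (the rewrite author's own statement) =====
-- stated objective: faster
-- what changed: Instead of scanning the fixed priority tuple with a dict lookup per platform and fully sorting the items for the fallback, B makes one pass over the items tracking the entry with the smallest precomputed rank, and uses min(items()) instead of sorted(...)[0] for the fallback.
import Mathlib
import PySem

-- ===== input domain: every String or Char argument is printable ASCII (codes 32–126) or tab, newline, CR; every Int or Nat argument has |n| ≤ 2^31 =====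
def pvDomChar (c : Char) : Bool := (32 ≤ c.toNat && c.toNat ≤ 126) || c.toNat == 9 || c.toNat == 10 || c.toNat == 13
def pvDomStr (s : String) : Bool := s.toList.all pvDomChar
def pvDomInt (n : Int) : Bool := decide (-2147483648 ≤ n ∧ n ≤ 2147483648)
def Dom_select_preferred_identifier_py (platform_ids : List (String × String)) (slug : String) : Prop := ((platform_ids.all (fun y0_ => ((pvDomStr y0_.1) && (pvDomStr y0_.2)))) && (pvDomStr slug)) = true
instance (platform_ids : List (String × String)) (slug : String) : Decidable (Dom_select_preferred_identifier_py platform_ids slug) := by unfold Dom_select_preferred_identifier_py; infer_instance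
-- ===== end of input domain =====

-- B replaces A's scan of the priority tuple (a dict lookup per platform, then a full sort
-- for the fallback) by a single pass over the items tracking the least-rank truthy entry,
-- with min(items()) for the fallback: O(n) instead of O(n log n) (objective: faster).

-- ===== PORT A =====
def pvPriority : List String :=
  ["steam", "epic", "psn", "ps4", "ps5", "xbox", "xboxone",
   "xboxseries", "switch", "nintendo"]

-- platform_ids.get(platform): first-match lookup in the association list
def pvGet : List (String × String) → String → Option String
  | [], _ => none
  | kv :: rest, k => if kv.1 = k then some kv.2 else pvGet rest k

-- the 'for platform in _PLATFORM_PRIORITY' loop with its early return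
def pvScanPriority (platform_ids : List (String × String)) : List String → Option String
  | [] => none
  | p :: rest =>
    match pvGet platform_ids p with
    | some v => if v ≠ "" then some (p ++ ":" ++ v) else pvScanPriority platform_ids rest
    | none => pvScanPriority platform_ids rest

def select_preferred_identifier_py (platform_ids : List (String × String)) (slug : String) : String :=
  match pvScanPriority platform_ids pvPriority with
  | some r => r
  | none =>
    if platform_ids ≠ [] then
      match (PySem.List.sorted2 platform_ids (fun p => p.1) (fun p => p.2)).head? with
      | some pv => pv.1 ++ ":" ++ pv.2
      | none => ""   -- unreachable: sorted of a nonempty list is nonempty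
    else "slug:" ++ slug

-- ===== PORT B =====
-- B's literal dict _RANK, as an association list
def pvRankPairs : List (String × Nat) :=
  [("steam", 0), ("epic", 1), ("psn", 2), ("ps4", 3), ("ps5", 4),
   ("xbox", 5), ("xboxone", 6), ("xboxseries", 7), ("switch", 8), ("nintendo", 9)]

-- _RANK.get(platform): lookup in the rank dict
def pvRankGet : List (String × Nat) → String → Option Nat
  | [], _ => none
  | kv :: rest, k => if k = kv.1 then some kv.2 else pvRankGet rest k

-- one iteration of B's 'for platform, value in platform_ids.items()' loop body,
-- parameterised by the rank lookup
def pvBestStepR (rank : String → Option Nat) (best : Option (Nat × String × String))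
    (kv : String × String) : Option (Nat × String × String) :=
  if kv.2 ≠ "" then
    match rank kv.1 with
    | some r =>
      match best with
      | none => some (r, kv.1, kv.2)
      | some b => if r < b.1 then some (r, kv.1, kv.2) else some b
    | none => best
  else best

def select_preferred_identifier_py_alt (platform_ids : List (String × String)) (slug : String) : String :=
  match platform_ids.foldl (pvBestStepR (pvRankGet pvRankPairs)) none with
  | some b => b.2.1 ++ ":" ++ b.2.2
  | none =>
    match PySem.List.min2? platform_ids (fun p => p.1) (fun p => p.2) with
    | some pv => pv.1 ++ ":" ++ pv.2
    | none => "slug:" ++ slug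

-- ===== PRECONDITION & SPEC =====
-- The dict parameter is encoded as an association list; a Python dict has unique keys, so
-- Pre_ only excludes encodings with duplicate keys (which no dict produces), on which A's
-- first-match lookup and B's whole-list scan read different entries.
def Pre_select_preferred_identifier_py (platform_ids : List (String × String)) (slug : String) : Prop :=
  (platform_ids.map Prod.fst).Nodup
instance (platform_ids : List (String × String)) (slug : String) : Decidable (Pre_select_preferred_identifier_py platform_ids slug) := by unfold Pre_select_preferred_identifier_py; infer_instance

def pvWitness_select_preferred_identifier_py : (List (String × String)) × String :=
  ([("steam", "70"), ("other", "x")], "g")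

def Spec_select_preferred_identifier_py (platform_ids : List (String × String)) (slug : String) (out : String) : Prop := out = select_preferred_identifier_py_alt platform_ids slug
instance (platform_ids : List (String × String)) (slug : String) (out : String) : Decidable (Spec_select_preferred_identifier_py platform_ids slug out) := by unfold Spec_select_preferred_identifier_py; infer_instance

-- ===== CLAIM (what is proved, stated in full; the proofs are below) =====
def Claim_equal_select_preferred_identifier_py : Prop := ∀ (platform_ids : List (String × String)) (slug : String), Dom_select_preferred_identifier_py platform_ids slug → Pre_select_preferred_identifier_py platform_ids slug → Spec_select_preferred_identifier_py platform_ids slug (select_preferred_identifier_py platform_ids slug)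

-- ===== LEMMAS AND PROOFS =====

-- proof-side view of the rank dict: rank by position in a priority list
def pvRank : List String → String → Option Nat
  | [], _ => none
  | p :: rest, k => if k = p then some 0 else (pvRank rest k).map (· + 1)

def pvBestStep (prio : List String) : Option (Nat × String × String) → (String × String) →
    Option (Nat × String × String) := pvBestStepR (pvRank prio)

-- the literal rank dict of B agrees with rank-by-position in A's priority list
theorem pvRankGet_eq : pvRankGet pvRankPairs = pvRank pvPriority := by
  funext k
  simp only [pvRankPairs, pvPriority, pvRankGet, pvRank]
  split_ifs <;> rfl

theorem pvGet_none {l : List (String × String)} {p : String}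
    (h : pvGet l p = none) : ∀ kv ∈ l, kv.1 ≠ p := by
  induction l with
  | nil => intro kv hkv; cases hkv
  | cons kv t ih =>
    intro x hx
    simp only [pvGet] at h
    by_cases hk : kv.1 = p
    · simp [hk] at h
    · simp only [if_neg hk] at h
      rcases List.mem_cons.mp hx with he | hx
      · rw [he]; exact hk
      · exact ih h x hx

theorem pvGet_mem {l : List (String × String)} (hnd : (l.map Prod.fst).Nodup)
    {kv : String × String} (h : kv ∈ l) : pvGet l kv.1 = some kv.2 := by
  induction l with
  | nil => cases h
  | cons hd t ih =>
    simp only [List.map_cons, List.nodup_cons] at hnd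
    rcases List.mem_cons.mp h with he | h
    · rw [he]; simp [pvGet]
    · have hne : hd.1 ≠ kv.1 := by
        intro heq
        exact hnd.1 (heq ▸ List.mem_map_of_mem h)
      simp only [pvGet, if_neg hne]
      exact ih hnd.2 h

-- with the empty priority list the fold never changes its accumulator
theorem pvFold_nil_prio : ∀ (l : List (String × String)) (acc : Option (Nat × String × String)),
    l.foldl (pvBestStep []) acc = acc := by
  intro l
  induction l with
  | nil => intro acc; rfl
  | cons kv t ih =>
    intro acc
    have hstep : pvBestStep [] acc kv = acc := by
      unfold pvBestStep pvBestStepR; split <;> rfl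
    rw [List.foldl_cons, hstep, ih]

-- a best with rank 0 is never replaced
theorem pvFold_keep_zero (prio : List String) (x : String × String)
    (l : List (String × String)) :
    l.foldl (pvBestStep prio) (some (0, x.1, x.2)) = some (0, x.1, x.2) := by
  induction l with
  | nil => rfl
  | cons kv t ih =>
    have hstep : pvBestStep prio (some (0, x.1, x.2)) kv = some (0, x.1, x.2) := by
      unfold pvBestStep pvBestStepR
      split
      · cases hr : pvRank prio kv.1 with
        | none => rfl
        | some r => simp
      · rfl
    rw [List.foldl_cons, hstep, ih]

-- rank of a non-head key is never 0
theorem pvRank_cons_ne {prio : List String} {p k : String} (hne : k ≠ p) :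
    pvRank (p :: prio) k = (pvRank prio k).map (· + 1) := by
  simp [pvRank, hne]

-- if the first entry with key p has a truthy value, the fold ends at rank 0
theorem pvFold_hits_zero (rest : List String) (p v : String)
    (l : List (String × String)) (hv : v ≠ "") :
    ∀ acc : Option (Nat × String × String),
      (∀ b, acc = some b → 0 < b.1) →
      pvGet l p = some v →
      l.foldl (pvBestStep (p :: rest)) acc = some (0, p, v) := by
  induction l with
  | nil => intro acc _ hg; cases hg
  | cons kv t ih =>
    intro acc hacc hg
    simp only [pvGet] at hg
    by_cases hk : kv.1 = p
    · rw [if_pos hk] at hg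
      injection hg with hv2
      have hstep : pvBestStep (p :: rest) acc kv = some (0, p, v) := by
        unfold pvBestStep pvBestStepR
        rw [if_pos (by rw [hv2]; exact hv)]
        have hr0 : pvRank (p :: rest) kv.1 = some 0 := by simp [pvRank, hk]
        rw [hr0]
        cases acc with
        | none => rw [hk, hv2]
        | some b =>
          have hb1 := hacc b rfl
          simp [hk, hv2, hb1]
      rw [List.foldl_cons, hstep]
      exact pvFold_keep_zero (p :: rest) (p, v) t
    · rw [if_neg hk] at hg
      rw [List.foldl_cons]
      apply ih _ _ hg
      intro b hb
      unfold pvBestStep pvBestStepR at hb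
      split at hb
      · rw [pvRank_cons_ne hk] at hb
        cases hr : pvRank rest kv.1 with
        | none => rw [hr] at hb; exact hacc b hb
        | some r =>
          rw [hr] at hb
          simp only [Option.map_some] at hb
          cases acc with
          | none =>
            have hbe := Option.some.inj hb
            rw [← hbe]
            simp
          | some b0 =>
            by_cases hlt : r + 1 < b0.1
            · simp only [if_pos hlt] at hb
              have hbe := Option.some.inj hb
              rw [← hbe]
              simp
            · simp only [if_neg hlt] at hb
              have hbe := Option.some.inj hb
              rw [← hbe]
              exact hacc b0 rfl
      · exact hacc b hb

-- shifting every rank by one commutes with the fold, provided key p only carries falsy values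
def pvShift (b : Nat × String × String) : Nat × String × String := (b.1 + 1, b.2)

theorem pvFold_shift (rest : List String) (p : String)
    (l : List (String × String)) (Hp : ∀ kv ∈ l, kv.1 = p → kv.2 = "") :
    ∀ acc : Option (Nat × String × String),
      l.foldl (pvBestStep (p :: rest)) (acc.map pvShift) =
        (l.foldl (pvBestStep rest) acc).map pvShift := by
  induction l with
  | nil => intro acc; rfl
  | cons kv t ih =>
    intro acc
    have Hp' : ∀ x ∈ t, x.1 = p → x.2 = "" := fun x hx => Hp x (List.mem_cons_of_mem _ hx)
    rw [List.foldl_cons, List.foldl_cons]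
    have hstep : pvBestStep (p :: rest) (acc.map pvShift) kv =
        (pvBestStep rest acc kv).map pvShift := by
      by_cases hv : kv.2 = ""
      · unfold pvBestStep pvBestStepR; rw [if_neg (by simp [hv]), if_neg (by simp [hv])]
      · have hk : kv.1 ≠ p := by
          intro he; exact hv (Hp kv (List.mem_cons_self) he)
        unfold pvBestStep pvBestStepR
        rw [if_pos hv, if_pos hv, pvRank_cons_ne hk]
        cases hr : pvRank rest kv.1 with
        | none => rfl
        | some r =>
          simp only [Option.map_some]
          cases acc with
          | none => rfl
          | some b =>
            simp only [Option.map_some, pvShift]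
            by_cases hlt : r < b.1
            · rw [if_pos hlt, if_pos (show r + 1 < b.1 + 1 by omega)]
              simp [pvShift]
            · rw [if_neg hlt, if_neg (show ¬ r + 1 < b.1 + 1 by omega)]
              simp [pvShift]
    rw [hstep, ih Hp']

def pvFmt (b : Nat × String × String) : String := b.2.1 ++ ":" ++ b.2.2

-- the priority scan of A equals the formatted result of B's single-pass fold
theorem pvScan_eq_fold (ids : List (String × String))
    (hnd : (ids.map Prod.fst).Nodup) :
    ∀ prio : List String,
      pvScanPriority ids prio = (ids.foldl (pvBestStep prio) none).map pvFmt := by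
  intro prio
  induction prio with
  | nil => rw [pvFold_nil_prio]; rfl
  | cons p rest ih =>
    simp only [pvScanPriority]
    cases hg : pvGet ids p with
    | none =>
      have Hp : ∀ kv ∈ ids, kv.1 = p → kv.2 = "" := by
        intro kv hkv he
        exact absurd he (pvGet_none hg kv hkv)
      have hsh := pvFold_shift rest p ids Hp none
      simp only [Option.map_none] at hsh
      rw [ih, hsh]
      cases ids.foldl (pvBestStep rest) none with
      | none => rfl
      | some b => rfl
    | some v =>
      have hred : (match some v with
          | some v => if v ≠ "" then some (p ++ ":" ++ v) else pvScanPriority ids rest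
          | none => pvScanPriority ids rest) =
          if v ≠ "" then some (p ++ ":" ++ v) else pvScanPriority ids rest := rfl
      rw [hred]
      by_cases hv : v = ""
      · rw [if_neg (by rw [hv]; simp)]
        have Hp : ∀ kv ∈ ids, kv.1 = p → kv.2 = "" := by
          intro kv hkv he
          have hm := pvGet_mem hnd hkv
          rw [he, hg] at hm
          rw [← Option.some.inj hm, hv]
        have hsh := pvFold_shift rest p ids Hp none
        simp only [Option.map_none] at hsh
        rw [ih, hsh]
        cases ids.foldl (pvBestStep rest) none with
        | none => rfl
        | some b => rfl
      · rw [if_pos hv, pvFold_hits_zero rest p v ids hv none (by intro b hb; cases hb) hg]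
        rfl

-- head of an insertion sort is the running strict-minimum of the same comparison
theorem pvHead_foldl_insertBy {α : Type} (lt : α → α → Bool) :
    ∀ (xs acc : List α),
      (xs.foldl (fun a x => PySem.List.insertBy lt x a) acc).head? =
        xs.foldl (fun m x =>
          match m with
          | none => some x
          | some m => if lt x m then some x else some m) acc.head? := by
  intro xs
  induction xs with
  | nil => intro acc; rfl
  | cons x t ih =>
    intro acc
    rw [List.foldl_cons, List.foldl_cons, ih]
    congr 1
    cases acc with
    | nil => rfl
    | cons y ys =>
      simp only [PySem.List.insertBy, List.head?]
      by_cases h : lt x y = true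
      · simp [h]
      · simp [h]

theorem pvHead_sorted2 (ids : List (String × String)) :
    (PySem.List.sorted2 ids (fun p => p.1) (fun p => p.2)).head? =
      PySem.List.min2? ids (fun p => p.1) (fun p => p.2) := by
  simpa [PySem.List.sorted2, PySem.List.min2?] using
    pvHead_foldl_insertBy
      (fun a b : String × String =>
        decide (a.1 < b.1) || (!decide (b.1 < a.1) && decide (a.2 < b.2))) ids []

-- ===== VERDICT (by name: the statement is the Claim_ definition above) =====
theorem select_preferred_identifier_py_spec : Claim_equal_select_preferred_identifier_py := by
  intro ids slug _ hnd
  unfold Spec_select_preferred_identifier_py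
  unfold select_preferred_identifier_py select_preferred_identifier_py_alt
  rw [pvScan_eq_fold ids hnd pvPriority]
  have hfold : ids.foldl (pvBestStepR (pvRankGet pvRankPairs)) none =
      ids.foldl (pvBestStep pvPriority) none := by
    unfold pvBestStep
    rw [pvRankGet_eq]
  rw [hfold]
  cases hb : ids.foldl (pvBestStep pvPriority) none with
  | some b => rfl
  | none =>
    simp only [Option.map_none]
    cases ids with
    | nil => simp [PySem.List.min2?]
    | cons kv t =>
      rw [if_pos (by simp), pvHead_sorted2]
      cases hm : PySem.List.min2? (kv :: t) (fun p => p.1) (fun p => p.2) with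
      | some pv => rfl
      | none =>
        exfalso
        have hperm := PySem.List.sorted2_perm (kv :: t) (fun p : String × String => p.1)
          (fun p : String × String => p.2) false
        have hlen := hperm.length_eq
        have hh : (PySem.List.sorted2 (kv :: t) (fun p : String × String => p.1)
            (fun p : String × String => p.2)).head? = none := by
          rw [pvHead_sorted2, hm]
        cases hs : PySem.List.sorted2 (kv :: t) (fun p : String × String => p.1)
            (fun p : String × String => p.2) with
        | nil => rw [hs] at hlen; simp at hlen
        | cons a b => rw [hs] at hh; simp at hh
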